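-- pv_equiv track=rewrite | github.com/sarinali/cp | complete(python)!/ccc20j4.py | instring
-- ===== SOURCE A (Python) =====
-- def instring(t, s):
--     for i in range(len(s)):
--         firsthalf = s[i:]
--         secondhalf = s[:i]
--         cycles = firsthalf + secondhalf
--         if cycles in t:
--             return True
--
--     return False
-- ===== SOURCE B (Python) =====
-- def instring(t, s):
--     # Reverse search: instead of generating every rotation of s and searching t,
--     # slide a length-len(s) window over t and test it against s+s (every
--     # length-len(s) substring of s+s is exactly a rotation of s).
--     L = len(s)
--     doubled = s + s
--     for j in range(len(t) - L + 1):
--         if t[j:j + L] in doubled: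
--             return True
--     return False
-- ===== Notes on version B (the rewrite author's own statement) =====
-- stated objective: faster
-- what changed: B reverses the search direction: instead of generating each of the |s| rotations of s and scanning all of t for every one, B slides one length-|s| window over t and tests the window against the doubled string s+s, whose length-|s| substrings are exactly the rotations of s.
-- outside the precondition, e.g. on instring('abc', ''): A returns False, B returns True
import Mathlib
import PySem

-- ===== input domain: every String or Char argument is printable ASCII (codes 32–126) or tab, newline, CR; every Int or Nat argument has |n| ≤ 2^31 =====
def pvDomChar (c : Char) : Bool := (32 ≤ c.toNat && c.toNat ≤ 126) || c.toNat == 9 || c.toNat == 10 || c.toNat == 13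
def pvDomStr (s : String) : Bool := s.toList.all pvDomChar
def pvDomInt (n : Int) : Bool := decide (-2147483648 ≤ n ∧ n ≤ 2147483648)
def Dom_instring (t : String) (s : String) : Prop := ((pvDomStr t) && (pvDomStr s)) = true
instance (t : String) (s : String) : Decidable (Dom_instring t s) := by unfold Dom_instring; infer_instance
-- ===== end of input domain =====

-- B reverses the search: instead of generating every rotation of s and searching each in t,
-- it slides a length-|s| window over t and tests the window against s+s (measurably faster: each membership test scans the short doubled string, not all of t).

-- ===== PORT A =====
-- for i in range(len(s)): if s[i:]+s[:i] in t: return True ; return False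
def instring (t : String) (s : String) : Bool :=
  (PySem.List.pyRange 0 (s.toList.length : Int) 1).any (fun i =>
    let firsthalf := PySem.Chars.slice s.toList (some i) none
    let secondhalf := PySem.Chars.slice s.toList none (some i)
    let cycles := firsthalf ++ secondhalf
    PySem.Chars.isIn cycles t.toList)

-- ===== PORT B =====
-- L = len(s); doubled = s+s; for j in range(len(t)-L+1): if t[j:j+L] in doubled: return True ; return False
def instring_alt (t : String) (s : String) : Bool :=
  let L : Int := (s.toList.length : Int)
  let doubled := s.toList ++ s.toList
  (PySem.List.pyRange 0 ((t.toList.length : Int) - L + 1) 1).any (fun j =>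
    PySem.Chars.isIn (PySem.Chars.slice t.toList (some j) (some (j + L))) doubled)

-- ===== PRECONDITION & SPEC =====
-- Pre_ excludes only the empty s, a corner where A's False (its loop never runs) and
-- B's True (the empty string is a substring of s+s and of any t) are both defensible.
def Pre_instring (t : String) (s : String) : Prop := s ≠ ""
instance (t : String) (s : String) : Decidable (Pre_instring t s) := by unfold Pre_instring; infer_instance
def pvWitness_instring : String × String := ("abcab", "ab")

def Spec_instring (t : String) (s : String) (out : Bool) : Prop := out = instring_alt t s
instance (t : String) (s : String) (out : Bool) : Decidable (Spec_instring t s out) := by unfold Spec_instring; infer_instance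

-- ===== CLAIM (what is proved, stated in full; the proofs are below) =====
def Claim_equal_instring : Prop := ∀ (t : String) (s : String), Dom_instring t s → Pre_instring t s → Spec_instring t s (instring t s)

-- ===== LEMMAS AND PROOFS =====

-- a length-n window of cs++cs at offset k ≤ n (n = cs.length) is the rotation of cs by k (by 0 when k = n)
theorem window_doubled_eq_rotation (cs : List Char) (k : Nat) (hk : k ≤ cs.length) :
    ((cs ++ cs).drop k).take cs.length = cs.drop k ++ cs.take k := by
  rw [List.drop_append, Nat.sub_eq_zero_of_le hk, List.drop_zero, List.take_append,
    List.take_of_length_le (by simp), List.length_drop,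
    show cs.length - (cs.length - k) = k by omega]

-- the doubled string written around the rotation by i
theorem doubled_around_rotation (cs : List Char) (i : Nat) :
    cs ++ cs = cs.take i ++ (cs.drop i ++ cs.take i) ++ cs.drop i :=
  calc cs ++ cs = (cs.take i ++ cs.drop i) ++ (cs.take i ++ cs.drop i) := by
        rw [List.take_append_drop]
    _ = cs.take i ++ (cs.drop i ++ cs.take i) ++ cs.drop i := by
        simp only [List.append_assoc]

-- an infix equals the window of its host at the offset of the left part
theorem infix_eq_window {w l : List Char} (h : w <:+: l) :
    ∃ k, k + w.length ≤ l.length ∧ w = (l.drop k).take w.length := by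
  rcases h with ⟨p, q, rfl⟩
  exact ⟨p.length, by simp only [List.length_append]; omega, by simp⟩

-- the core equivalence of the two searches, on toList level
theorem key (ts cs : List Char) (hcs : cs ≠ []) :
    ((PySem.List.pyRange 0 (cs.length : Int) 1).any (fun i =>
        PySem.Chars.isIn (PySem.Chars.slice cs (some i) none ++ PySem.Chars.slice cs none (some i)) ts))
    =
    ((PySem.List.pyRange 0 ((ts.length : Int) - (cs.length : Int) + 1) 1).any (fun j =>
        PySem.Chars.isIn (PySem.Chars.slice ts (some j) (some (j + (cs.length : Int)))) (cs ++ cs))) := by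
  have hpos : 0 < cs.length := List.length_pos_iff.mpr hcs
  apply Bool.eq_iff_iff.mpr
  simp only [List.any_eq_true, PySem.List.mem_pyRange_one, PySem.Chars.isIn_iff_infix,
    PySem.Chars.slice_eq_listSlice]
  constructor
  · rintro ⟨i, ⟨hi0, hilt⟩, hinf⟩
    -- the rotation by i occurs in ts at some offset k; B finds the window at k
    lift i to Nat using hi0
    rw [PySem.List.slice_from_natCast, PySem.List.slice_to_natCast] at hinf
    obtain ⟨k, hk, hw⟩ := infix_eq_window hinf
    have hlen : (cs.drop i ++ cs.take i).length = cs.length := by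
      simp; omega
    rw [hlen] at hk hw
    refine ⟨(k : Int), ⟨by positivity, by omega⟩, ?_⟩
    have : PySem.List.slice ts (some (k : Int)) (some ((k : Int) + (cs.length : Int))) =
        (ts.drop k).take cs.length := by
      rw [PySem.List.slice_natCast_add]
    rw [this, ← hw, doubled_around_rotation cs i]
    exact ⟨cs.take i, cs.drop i, rfl⟩
  · rintro ⟨j, ⟨hj0, hjlt⟩, hinf⟩
    lift j to Nat using hj0
    have hjle : j + cs.length ≤ ts.length := by omega
    rw [show ((j : Int) + (cs.length : Int)) = ((j + cs.length : Nat) : Int) by push_cast; ring,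
      PySem.List.slice_natCast] at hinf
    have hwin : (ts.drop j).take (j + cs.length - j) = (ts.drop j).take cs.length := by
      congr 1; omega
    rw [hwin] at hinf
    -- the window has length cs.length, so its offset k inside cs++cs gives a rotation
    obtain ⟨k, hk, hw⟩ := infix_eq_window hinf
    have hwl : ((ts.drop j).take cs.length).length = cs.length := by
      simp; omega
    rw [hwl] at hk hw
    have hk' : k ≤ cs.length := by simp at hk; omega
    set i : Nat := if k = cs.length then 0 else k with hidef
    have hilt : i < cs.length := by
      by_cases h : k = cs.length <;> simp [hidef, h] <;> omega
    refine ⟨(i : Int), ⟨by positivity, by exact_mod_cast hilt⟩, ?_⟩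
    rw [PySem.List.slice_from_natCast, PySem.List.slice_to_natCast]
    have hrot : cs.drop i ++ cs.take i = (ts.drop j).take cs.length := by
      rw [hw, window_doubled_eq_rotation cs k hk']
      by_cases h : k = cs.length <;> simp [hidef, h]
    rw [hrot]
    -- the window occurs in ts at offset j
    refine ⟨ts.take j, ts.drop (j + cs.length), ?_⟩
    rw [← List.take_append_drop cs.length (ts.drop j)]
    simp [List.drop_drop, List.append_assoc]
  
-- ===== VERDICT (by name: the statement is the Claim_ definition above) =====
theorem instring_spec : Claim_equal_instring := by
  intro t s _ hpre
  show instring t s = instring_alt t s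
  have hcs : s.toList ≠ [] := fun h2 => hpre (String.toList_inj.mp (h2.trans rfl))
  simpa [instring, instring_alt] using key t.toList s.toList hcs
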